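-- pv_equiv track=rewrite | github.com/vagabondHustler/subsearch | tools/git/branch_creator/main.py | index_available_branches
-- ===== SOURCE A (Python) =====
-- def index_available_branches(branches: list[str]) -> list[tuple[int, str]]:
--     index_branches = []
--     for num, branch in enumerate(branches, 2):
--         if branch == "dev":
--             num = 0
--         if branch == "main":
--             num = 1
--         index_branches.append((num, branch))
--     index_branches.sort()
--     return index_branches
-- ===== SOURCE B (Python) =====
-- def index_available_branches(branches: list[str]) -> list[tuple[int, str]]:
--     # Single pass into three buckets instead of build-then-sort: dev keys are all 0,
--     # main keys all 1, and remaining keys are strictly increasing positions, so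
--     # concatenating the buckets already yields the sorted order.
--     devs, mains, rest = [], [], []
--     for num, branch in enumerate(branches, 2):
--         if branch == "dev":
--             devs.append((0, branch))
--         elif branch == "main":
--             mains.append((1, branch))
--         else:
--             rest.append((num, branch))
--     return devs + mains + rest
-- ===== Notes on version B (the rewrite author's own statement) =====
-- stated objective: alternative
-- what changed: Replaces build-then-sort with a single bucketing pass (devs/mains/rest concatenated), exploiting that the sort keys are 0 for dev, 1 for main, and strictly increasing positions otherwise, so concatenating buckets reproduces the sorted order without calling sort.
import Mathlib
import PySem

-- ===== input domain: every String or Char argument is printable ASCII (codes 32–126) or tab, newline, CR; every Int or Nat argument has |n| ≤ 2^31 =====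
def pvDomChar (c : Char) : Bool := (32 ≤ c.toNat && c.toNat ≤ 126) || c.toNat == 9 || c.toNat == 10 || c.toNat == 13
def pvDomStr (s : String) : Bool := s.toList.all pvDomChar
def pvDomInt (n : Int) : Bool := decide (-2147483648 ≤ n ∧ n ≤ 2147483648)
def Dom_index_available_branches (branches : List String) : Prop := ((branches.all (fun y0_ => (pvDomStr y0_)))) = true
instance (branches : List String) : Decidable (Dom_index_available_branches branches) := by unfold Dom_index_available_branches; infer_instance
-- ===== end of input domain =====

-- B replaces A's build-then-sort with a single bucketing pass (dev/main/rest) and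
-- concatenates the buckets, which reproduces the sorted order without sorting.


-- ===== PORT A =====
def index_available_branches (branches : List String) : List (Int × String) :=
  let index_branches : List (Int × String) :=
    (PySem.List.enumerate branches 2).foldl
      (fun acc nb =>
        let num := nb.1
        let branch := nb.2
        let num := if branch == "dev" then (0 : Int) else num
        let num := if branch == "main" then (1 : Int) else num
        acc ++ [(num, branch)]) []
  PySem.List.sorted2 index_branches (fun p => p.1) (fun p => p.2)

-- ===== PORT B =====
def index_available_branches_alt (branches : List String) : List (Int × String) :=
  let buckets :=
    (PySem.List.enumerate branches 2).foldl
      (fun (acc : List (Int × String) × List (Int × String) × List (Int × String)) nb =>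
        if nb.2 == "dev" then (acc.1 ++ [((0 : Int), nb.2)], acc.2.1, acc.2.2)
        else if nb.2 == "main" then (acc.1, acc.2.1 ++ [((1 : Int), nb.2)], acc.2.2)
        else (acc.1, acc.2.1, acc.2.2 ++ [(nb.1, nb.2)])) ([], [], [])
  buckets.1 ++ buckets.2.1 ++ buckets.2.2

-- ===== PRECONDITION & SPEC =====
def Spec_index_available_branches (branches : List String) (out : List (Int × String)) : Prop := out = index_available_branches_alt branches
instance (branches : List String) (out : List (Int × String)) : Decidable (Spec_index_available_branches branches out) := by unfold Spec_index_available_branches; infer_instance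

-- ===== CLAIM (what is proved, stated in full; the proofs are below) =====
def Claim_equal_index_available_branches : Prop := ∀ (branches : List String), Dom_index_available_branches branches → Spec_index_available_branches branches (index_available_branches branches)

-- ===== LEMMAS AND PROOFS =====

-- A's fused key update applied to one enumerated pair.
def pvKey (nb : Int × String) : Int × String :=
  (if nb.2 == "main" then (1 : Int) else if nb.2 == "dev" then (0 : Int) else nb.1, nb.2)

-- B's loop step, named for the proofs (definitionally the lambda in the port).
def pvStepB (acc : List (Int × String) × List (Int × String) × List (Int × String))
    (nb : Int × String) : List (Int × String) × List (Int × String) × List (Int × String) :=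
  if nb.2 == "dev" then (acc.1 ++ [((0 : Int), nb.2)], acc.2.1, acc.2.2)
  else if nb.2 == "main" then (acc.1, acc.2.1 ++ [((1 : Int), nb.2)], acc.2.2)
  else (acc.1, acc.2.1, acc.2.2 ++ [(nb.1, nb.2)])

def pvDev (nb : Int × String) : Bool := nb.2 == "dev"
def pvMain (nb : Int × String) : Bool := !(nb.2 == "dev") && nb.2 == "main"
def pvRest (nb : Int × String) : Bool := !(nb.2 == "dev") && !(nb.2 == "main")

-- B's three-bucket fold, characterised as three filtered maps.
theorem pv_buckets (e : List (Int × String)) (a b c : List (Int × String)) :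
    e.foldl pvStepB (a, b, c)
    = (a ++ (e.filter pvDev).map (fun nb => ((0 : Int), nb.2)),
       b ++ (e.filter pvMain).map (fun nb => ((1 : Int), nb.2)),
       c ++ (e.filter pvRest).map (fun nb => (nb.1, nb.2))) := by
  induction e generalizing a b c with
  | nil => simp
  | cons x t ih =>
    rw [List.foldl_cons]
    by_cases h1 : x.2 = "dev"
    · have hs : pvStepB (a, b, c) x = (a ++ [((0 : Int), x.2)], b, c) := by
        simp [pvStepB, h1]
      rw [hs, ih]
      simp [pvDev, pvMain, pvRest, h1]
    · by_cases h2 : x.2 = "main"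
      · have hs : pvStepB (a, b, c) x = (a, b ++ [((1 : Int), x.2)], c) := by
          simp [pvStepB, h2]
        rw [hs, ih]
        simp [pvDev, pvMain, pvRest, h2]
      · have hs : pvStepB (a, b, c) x = (a, b, c ++ [(x.1, x.2)]) := by
          simp [pvStepB, h1, h2]
        rw [hs, ih]
        simp [pvDev, pvMain, pvRest, h1, h2]

-- sorted2 with fst/snd keys is sorted with the lexicographic key.
theorem pv_sorted2_eq_lex (xs : List (Int × String)) :
    PySem.List.sorted2 xs (fun p => p.1) (fun p => p.2)
      = PySem.List.sorted xs (fun p => toLex p) := by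
  rw [PySem.List.sorted_eq_foldl_insertBy]
  show xs.foldl (fun acc x => PySem.List.insertBy
      (fun a b => decide (a.1 < b.1) || (!decide (b.1 < a.1) && decide (a.2 < b.2))) x acc) []
    = xs.foldl (fun acc x => PySem.List.insertBy
      (fun a b => decide ((fun p : Int × String => toLex p) a < (fun p : Int × String => toLex p) b)) x acc) []
  have hfun : (fun (a b : Int × String) =>
      decide (a.1 < b.1) || (!decide (b.1 < a.1) && decide (a.2 < b.2)))
      = fun (a b : Int × String) => decide ((fun p : Int × String => toLex p) a < (fun p : Int × String => toLex p) b) := by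
    funext a b
    have hlex : (toLex a < toLex b) ↔ (a.1 < b.1 ∨ a.1 = b.1 ∧ a.2 < b.2) := Prod.Lex.lt_iff
    by_cases h1 : a.1 < b.1
    · simp [h1, hlex]
    · by_cases h2 : b.1 < a.1
      · have h3 : ¬ (a.1 = b.1) := by omega
        simp [h1, h2, hlex, h3]
      · have h3 : a.1 = b.1 := by omega
        simp [hlex, h3]
  rw [hfun]

-- first components of enumerate are ≥ s and strictly increasing
theorem pv_enum_ge (xs : List String) (s : Int) :
    ∀ p ∈ PySem.List.enumerate xs s, s ≤ p.1 := by
  induction xs generalizing s with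
  | nil => simp [PySem.List.enumerate]
  | cons x t ih =>
    intro p hp
    rw [PySem.List.enumerate_cons] at hp
    rcases List.mem_cons.mp hp with h | h
    · simp [h]
    · have := ih (s + 1) p h; omega

theorem pv_enum_incr (xs : List String) (s : Int) :
    List.Pairwise (fun a b : Int × String => a.1 < b.1) (PySem.List.enumerate xs s) := by
  induction xs generalizing s with
  | nil => simp [PySem.List.enumerate]
  | cons x t ih =>
    rw [PySem.List.enumerate_cons]
    refine List.Pairwise.cons ?_ (ih (s + 1))
    intro p hp
    have := pv_enum_ge t (s + 1) p hp
    simp only []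
    omega

-- the dev bucket consists of copies of (0, "dev"); the main bucket of (1, "main")
theorem pv_dev_const (e : List (Int × String)) :
    (e.filter pvDev).map (fun nb => ((0 : Int), nb.2))
      = List.replicate (e.filter pvDev).length ((0 : Int), "dev") := by
  rw [← List.map_const]
  apply List.map_congr_left
  intro nb hnb
  have := List.of_mem_filter hnb
  simp [pvDev] at this
  simp [this]

theorem pv_main_const (e : List (Int × String)) :
    (e.filter pvMain).map (fun nb => ((1 : Int), nb.2))
      = List.replicate (e.filter pvMain).length ((1 : Int), "main") := by
  rw [← List.map_const]
  apply List.map_congr_left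
  intro nb hnb
  have := List.of_mem_filter hnb
  simp [pvMain] at this
  simp [this.2]

-- the concatenated buckets are a permutation of A's keyed list
theorem pv_perm (e : List (Int × String)) :
    ((e.filter pvDev).map (fun nb => ((0 : Int), nb.2)) ++
     ((e.filter pvMain).map (fun nb => ((1 : Int), nb.2)) ++
      (e.filter pvRest).map (fun nb => (nb.1, nb.2)))).Perm
    (e.map pvKey) := by
  have hpart : (e.filter pvDev ++ (e.filter pvMain ++ e.filter pvRest)).Perm e := by
    have h2 : ((e.filter (fun nb => !(pvDev nb))).filter (fun nb => nb.2 == "main") ++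
        (e.filter (fun nb => !(pvDev nb))).filter (fun nb => !(nb.2 == "main"))).Perm
        (e.filter (fun nb => !(pvDev nb))) := List.filter_append_perm _ _
    have h1 : (e.filter pvDev ++ e.filter (fun nb => !(pvDev nb))).Perm e :=
      List.filter_append_perm _ _
    have hm : (e.filter (fun nb => !(pvDev nb))).filter (fun nb => nb.2 == "main")
        = e.filter pvMain := by
      rw [List.filter_filter]
      apply List.filter_congr
      intro nb _
      simp [pvDev, pvMain, Bool.and_comm]
    have hr : (e.filter (fun nb => !(pvDev nb))).filter (fun nb => !(nb.2 == "main"))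
        = e.filter pvRest := by
      rw [List.filter_filter]
      apply List.filter_congr
      intro nb _
      simp [pvDev, pvRest, Bool.and_comm]
    rw [hm, hr] at h2
    exact ((List.Perm.append_left (e.filter pvDev) h2).trans h1)
  have hmap := hpart.map pvKey
  rw [List.map_append, List.map_append] at hmap
  have hda : (e.filter pvDev).map pvKey = (e.filter pvDev).map (fun nb => ((0 : Int), nb.2)) := by
    apply List.map_congr_left
    intro nb hnb
    have := List.of_mem_filter hnb
    simp [pvDev] at this
    simp [pvKey, this]
  have hma : (e.filter pvMain).map pvKey = (e.filter pvMain).map (fun nb => ((1 : Int), nb.2)) := by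
    apply List.map_congr_left
    intro nb hnb
    have := List.of_mem_filter hnb
    simp [pvMain] at this
    simp [pvKey, this.2]
  have hra : (e.filter pvRest).map pvKey = (e.filter pvRest).map (fun nb => (nb.1, nb.2)) := by
    apply List.map_congr_left
    intro nb hnb
    have := List.of_mem_filter hnb
    simp [pvRest] at this
    simp [pvKey, this.1, this.2]
  rw [hda, hma, hra] at hmap
  exact hmap

-- the concatenated buckets are lexicographically pairwise-≤
theorem pv_pairwise (branches : List String) :
    List.Pairwise (fun a b : Int × String => toLex a ≤ toLex b)
      (((PySem.List.enumerate branches 2).filter pvDev).map (fun nb => ((0 : Int), nb.2)) ++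
       (((PySem.List.enumerate branches 2).filter pvMain).map (fun nb => ((1 : Int), nb.2)) ++
        ((PySem.List.enumerate branches 2).filter pvRest).map (fun nb => (nb.1, nb.2)))) := by
  have hge : ∀ p ∈ PySem.List.enumerate branches 2, (2 : Int) ≤ p.1 := pv_enum_ge branches 2
  have hincr := pv_enum_incr branches 2
  have le_of : ∀ a b : Int × String, a.1 < b.1 → toLex a ≤ toLex b := by
    intro a b h
    rw [Prod.Lex.le_iff]; left; exact h
  rw [List.pairwise_append]
  refine ⟨?_, ?_, ?_⟩
  · rw [pv_dev_const]
    exact List.pairwise_replicate.mpr (Or.inr le_rfl)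
  · rw [List.pairwise_append]
    refine ⟨?_, ?_, ?_⟩
    · rw [pv_main_const]
      exact List.pairwise_replicate.mpr (Or.inr le_rfl)
    · apply List.Pairwise.map
      · intro a b hab
        exact le_of _ _ hab
      · exact List.Pairwise.filter _ hincr
    · intro x hx y hy
      simp only [List.mem_map] at hx hy
      obtain ⟨nb1, _, h1⟩ := hx
      obtain ⟨nb2, hm2, h2⟩ := hy
      have h3 := hge nb2 (List.mem_of_mem_filter hm2)
      apply le_of
      rw [← h1, ← h2]
      simp only []
      omega
  · intro x hx y hy
    simp only [List.mem_append, List.mem_map] at hx hy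
    obtain ⟨nb1, _, h1⟩ := hx
    apply le_of
    rcases hy with ⟨nb2, _, h2⟩ | ⟨nb2, hm2, h2⟩
    · rw [← h1, ← h2]
      norm_num
    · have h3 := hge nb2 (List.mem_of_mem_filter hm2)
      rw [← h1, ← h2]
      simp only []
      omega

-- ===== VERDICT (by name: the statement is the Claim_ definition above) =====
theorem index_available_branches_spec : Claim_equal_index_available_branches := by
  intro branches _
  show index_available_branches branches = index_available_branches_alt branches
  unfold index_available_branches index_available_branches_alt
  rw [show (fun (acc : List (Int × String)) (nb : Int × String) =>
        let num := nb.1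
        let branch := nb.2
        let num := if branch == "dev" then (0 : Int) else num
        let num := if branch == "main" then (1 : Int) else num
        acc ++ [(num, branch)]) = (fun acc nb => acc ++ [pvKey nb]) from rfl,
      PySem.List.foldl_append_singleton_eq_map,
      show (fun (acc : List (Int × String) × List (Int × String) × List (Int × String))
          (nb : Int × String) =>
        if nb.2 == "dev" then (acc.1 ++ [((0 : Int), nb.2)], acc.2.1, acc.2.2)
        else if nb.2 == "main" then (acc.1, acc.2.1 ++ [((1 : Int), nb.2)], acc.2.2)
        else (acc.1, acc.2.1, acc.2.2 ++ [(nb.1, nb.2)])) = pvStepB from rfl,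
      pv_buckets]
  simp only [List.nil_append, List.append_assoc]
  rw [pv_sorted2_eq_lex]
  apply PySem.List.eq_of_perm_of_pairwise_le_of_injective (fun p : Int × String => toLex p)
    (Equiv.injective toLex)
  · exact (PySem.List.sorted_perm _ _ _).trans (pv_perm _).symm
  · exact PySem.List.sorted_pairwise _ _
  · exact pv_pairwise branches
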